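-- pv_equiv track=rewrite | github.com/Cynsar-Capital/cc-vc | get_data.py | process_extracted_text
-- ===== SOURCE A (Python) =====
-- def process_extracted_text(text):
--     words = text.split()
--     processed_words = []
--
--     for i, word in enumerate(words):
--         if len(word) == 1 and processed_words:
--             processed_words[-1] += word  # append the character to the last word
--         else:
--             processed_words.append(word)
--
--     return ' '.join(processed_words)
-- ===== SOURCE B (Python) =====
-- def process_extracted_text(text):
--     # stage 1: collapse all whitespace runs into single spaces (no leading/trailing)
--     chars = []
--     pending = False
--     for c in text:
--         if c.isspace():
--             pending = True
--         else:
--             if pending and chars: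
--                 chars.append(' ')
--             chars.append(c)
--             pending = False
--     # stage 2: drop the space in front of each single-character token, left to right
--     out = []
--     i = 0
--     n = len(chars)
--     while i < n:
--         if chars[i] == ' ' and i + 1 < n and (i + 2 == n or chars[i + 2] == ' '):
--             out.append(chars[i + 1])
--             i += 2
--         else:
--             out.append(chars[i])
--             i += 1
--     return ''.join(out)
-- ===== Notes on version B (the rewrite author's own statement) =====
-- stated objective: alternative
-- what changed: Replaced the word-list algorithm (split, mutate the last element, re-join) with a character-stream rewrite: one pass collapses whitespace runs into single spaces, a second pass deletes the space standing before each single-character token (a hand-rolled form of the regex-substitution approach); no word list is ever built.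
import Mathlib
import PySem

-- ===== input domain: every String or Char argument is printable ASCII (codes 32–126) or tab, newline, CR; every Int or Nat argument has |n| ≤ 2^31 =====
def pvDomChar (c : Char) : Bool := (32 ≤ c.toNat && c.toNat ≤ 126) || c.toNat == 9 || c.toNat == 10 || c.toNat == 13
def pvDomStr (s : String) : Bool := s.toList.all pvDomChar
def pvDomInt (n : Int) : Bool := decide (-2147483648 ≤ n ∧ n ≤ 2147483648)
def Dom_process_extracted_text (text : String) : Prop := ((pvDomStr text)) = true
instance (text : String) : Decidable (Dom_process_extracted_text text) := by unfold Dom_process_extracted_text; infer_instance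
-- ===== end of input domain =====

-- B abandons A's word list (split, mutate the last element, join) for a character-stream rewrite:
-- normalize whitespace in one pass, then delete the space before each single-character token.

-- ===== PORT A =====
-- processed_words[-1] += word : append w to the last element of the list
def pvAddToLast (acc : List String) (w : String) : List String :=
  match acc with
  | [] => []
  | [x] => [x ++ w]
  | x :: y :: rest => x :: pvAddToLast (y :: rest) w

def process_extracted_text (text : String) : String :=
  let words := PySem.Str.split₀ text
  let processed := words.foldl
    (fun acc w =>
      if PySem.Str.len w == 1 && !acc.isEmpty then pvAddToLast acc w
      else acc ++ [w]) []
  PySem.Str.join " " processed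

-- ===== PORT B =====
-- stage 1 of Source B: collapse whitespace runs into single separating spaces
def pvNormStep (st : List Char × Bool) (c : Char) : List Char × Bool :=
  if PySem.Chars.isspace c then (st.1, true)
  else ((if st.2 && !st.1.isEmpty then st.1 ++ [' '] else st.1) ++ [c], false)

-- stage 2 of Source B: the while loop; `c1 :: c2 :: rest` is `chars[i], chars[i+1], chars[i+2:]`
def pvMerge : List Char → List Char
  | [] => []
  | [c] => [c]
  | c1 :: c2 :: rest =>
    if c1 == ' ' && (rest.isEmpty || rest.head? == some ' ')
    then c2 :: pvMerge rest
    else c1 :: pvMerge (c2 :: rest)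

def process_extracted_text_alt (text : String) : String :=
  String.ofList (pvMerge (text.toList.foldl pvNormStep ([], false)).1)

-- ===== PRECONDITION & SPEC =====
def Spec_process_extracted_text (text : String) (out : String) : Prop := out = process_extracted_text_alt text
instance (text : String) (out : String) : Decidable (Spec_process_extracted_text text out) := by unfold Spec_process_extracted_text; infer_instance

-- ===== CLAIM (what is proved, stated in full; the proofs are below) =====
def Claim_equal_process_extracted_text : Prop := ∀ (text : String), Dom_process_extracted_text text → Spec_process_extracted_text text (process_extracted_text text)

-- ===== LEMMAS AND PROOFS =====

-- join with a one-char separator, on the char-list side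
def pvJ (ws : List (List Char)) : List Char := PySem.Chars.join [' '] ws

lemma pvJ_append_last (ws : List (List Char)) (y : List Char) :
    pvJ (ws ++ [y]) = pvJ ws ++ (if ws.isEmpty then [] else [' ']) ++ y := by
  induction ws with
  | nil => simp [pvJ, PySem.Chars.join_singleton, PySem.Chars.join_nil]
  | cons x xs ih =>
      cases xs with
      | nil => simp [pvJ, PySem.Chars.join_singleton, PySem.Chars.join_cons_cons]
      | cons z zs =>
          have h1 : pvJ ((x :: z :: zs) ++ [y]) = x ++ [' '] ++ pvJ ((z :: zs) ++ [y]) := by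
            simp [pvJ, PySem.Chars.join_cons_cons]
          rw [h1, ih]
          simp [pvJ, PySem.Chars.join_cons_cons]

lemma pvJ_ne_nil (ws : List (List Char)) (h : ws ≠ []) (h2 : ∀ w ∈ ws, w ≠ []) :
    pvJ ws ≠ [] := by
  cases ws with
  | nil => exact absurd rfl h
  | cons w xs =>
      have hw : w ≠ [] := h2 w (by simp)
      cases xs with
      | nil => simpa [pvJ, PySem.Chars.join_singleton] using hw
      | cons z zs =>
          simp [pvJ, PySem.Chars.join_cons_cons]

-- split₀.go equations (rfl-provable from the olean definition)
lemma split₀_go_nil (cur : List Char) (acc : List (List Char)) :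
    PySem.Chars.split₀.go [] cur acc =
      if cur.isEmpty then acc.reverse else (cur.reverse :: acc).reverse := rfl

lemma split₀_go_cons (c : Char) (rest cur : List Char) (acc : List (List Char)) :
    PySem.Chars.split₀.go (c :: rest) cur acc =
      if PySem.Chars.isspace c then
        (if cur.isEmpty then PySem.Chars.split₀.go rest [] acc
         else PySem.Chars.split₀.go rest [] (cur.reverse :: acc))
      else PySem.Chars.split₀.go rest (c :: cur) acc := rfl

-- every word split₀ produces is nonempty and whitespace-free
lemma split₀_go_words (cs cur : List Char) (acc : List (List Char))
    (hacc : ∀ w ∈ acc, w ≠ [] ∧ ∀ c ∈ w, PySem.Chars.isspace c = false)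
    (hcur : ∀ c ∈ cur, PySem.Chars.isspace c = false) :
    ∀ w ∈ PySem.Chars.split₀.go cs cur acc, w ≠ [] ∧ ∀ c ∈ w, PySem.Chars.isspace c = false := by
  induction cs generalizing cur acc with
  | nil =>
      rw [split₀_go_nil]
      split
      · intro w hw; exact hacc w (List.mem_reverse.mp hw)
      · next hne =>
          intro w hw
          rw [List.mem_reverse, List.mem_cons] at hw
          rcases hw with hw | hw
          · subst hw
            refine ⟨by simpa using (by simpa using hne : cur ≠ []), ?_⟩
            intro c hc; exact hcur c (List.mem_reverse.mp hc)
          · exact hacc w hw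
  | cons c rest ih =>
      rw [split₀_go_cons]
      split
      · next hsp =>
          split
          · exact ih [] acc hacc (by simp)
          · next hne =>
              refine ih [] (cur.reverse :: acc) ?_ (by simp)
              intro w hw
              rw [List.mem_cons] at hw
              rcases hw with hw | hw
              · subst hw
                refine ⟨by simpa using (by simpa using hne : cur ≠ []), ?_⟩
                intro d hd; exact hcur d (List.mem_reverse.mp hd)
              · exact hacc w hw
      · next hsp =>
          refine ih (c :: cur) acc hacc ?_
          intro d hd
          rw [List.mem_cons] at hd
          rcases hd with hd | hd
          · subst hd; simpa using hsp
          · exact hcur d hd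

-- words joined so far, as stage 1's output text
def pvOut (cur : List Char) (acc : List (List Char)) : List Char :=
  pvJ (acc.reverse ++ if cur.isEmpty then [] else [cur.reverse])

-- stage 1 simulates split₀.go: its output is ' '.join of the split words
lemma norm_sim (cs : List Char) : ∀ (cur : List Char) (acc : List (List Char)) (pending : Bool),
    (cur ≠ [] → pending = false) →
    (cur = [] → acc ≠ [] → pending = true) →
    (∀ w ∈ acc, w ≠ []) →
    (cs.foldl pvNormStep (pvOut cur acc, pending)).1 = pvJ (PySem.Chars.split₀.go cs cur acc) := by
  induction cs with
  | nil =>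
      intro cur acc pending hp hq hacc
      rw [split₀_go_nil]
      simp only [List.foldl_nil]
      split
      · next he => simp [pvOut, he]
      · next he => simp [pvOut, he, List.reverse_cons]
  | cons c rest ih =>
      intro cur acc pending hp hq hacc
      rw [split₀_go_cons, List.foldl_cons]
      by_cases hsp : PySem.Chars.isspace c = true
      · simp only [pvNormStep, hsp, reduceIte]
        by_cases hc : cur = []
        · subst hc
          simp only [List.isEmpty_nil, reduceIte]
          by_cases ha : (acc : List (List Char)) = []
          · subst ha
            have h0 : pvOut ([] : List Char) ([] : List (List Char)) = pvOut [] [] := rfl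
            exact ih [] [] true (fun h => absurd rfl h) (fun _ h => absurd rfl h) (by simp)
          · have hpend : pending = true := hq rfl ha
            subst hpend
            exact ih [] acc true (fun h => absurd rfl h) (fun _ _ => rfl) hacc
        · have hcur' : cur.isEmpty = false := by simpa using hc
          simp only [hcur', Bool.false_eq_true, reduceIte]
          have hout : pvOut cur acc = pvOut [] (cur.reverse :: acc) := by
            simp [pvOut, hcur', List.reverse_cons]
          rw [hout]
          exact ih [] (cur.reverse :: acc) true (fun h => absurd rfl h) (fun _ _ => rfl)
            (by intro w hw
                rw [List.mem_cons] at hw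
                rcases hw with hw | hw
                · subst hw; simpa using hc
                · exact hacc w hw)
      · have hsp' : PySem.Chars.isspace c = false := by simpa using hsp
        simp only [pvNormStep, hsp', Bool.false_eq_true, reduceIte]
        have hnew : (if pending && !(pvOut cur acc).isEmpty then pvOut cur acc ++ [' '] else pvOut cur acc) ++ [c]
            = pvOut (c :: cur) acc := by
          by_cases hc : cur = []
          · subst hc
            by_cases ha : (acc : List (List Char)) = []
            · subst ha
              simp [pvOut, pvJ, PySem.Chars.join_nil, PySem.Chars.join_singleton]
            · have hpend : pending = true := hq rfl ha
              subst hpend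
              have hacc' : acc.reverse ≠ [] := by simpa using ha
              have hne : pvOut ([] : List Char) acc ≠ [] := by
                simp only [pvOut, List.isEmpty_nil, reduceIte, List.append_nil]
                exact pvJ_ne_nil acc.reverse hacc' (fun w hw => hacc w (List.mem_reverse.mp hw))
              have hne' : (pvOut ([] : List Char) acc).isEmpty = false := by simpa using hne
              simp only [hne', Bool.not_false, Bool.and_self, reduceIte]
              have h1 : pvOut [c] acc = pvJ (acc.reverse ++ [[c]]) := by
                simp [pvOut]
              rw [h1, pvJ_append_last]
              simp [pvOut, ha, List.append_assoc]
          · have hpend : pending = false := hp hc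
            subst hpend
            simp only [Bool.false_and, Bool.false_eq_true, reduceIte]
            have h1 : pvOut cur acc = pvJ (acc.reverse ++ [cur.reverse]) := by
              simp [pvOut, hc]
            have h2 : pvOut (c :: cur) acc = pvJ (acc.reverse ++ [cur.reverse ++ [c]]) := by
              simp [pvOut, List.reverse_cons]
            rw [h1, h2, pvJ_append_last, pvJ_append_last]
            simp [List.append_assoc]
        rw [hnew]
        exact ih (c :: cur) acc false (fun _ => rfl) (fun h => absurd h (by simp)) hacc

-- a block of non-space characters passes through pvMerge unchanged
lemma merge_skip_word (w : List Char) (t : List Char) (h : ∀ c ∈ w, c ≠ ' ') :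
    pvMerge (w ++ t) = w ++ pvMerge t := by
  induction w with
  | nil => simp
  | cons a w' ih =>
      have ha : a ≠ ' ' := h a (by simp)
      have ha' : (a == ' ') = false := by simpa using ha
      cases hwt : w' ++ t with
      | nil =>
          rcases List.append_eq_nil_iff.mp hwt with ⟨hw', ht⟩
          subst hw'; subst ht
          simp [pvMerge]
      | cons b l =>
          have : pvMerge (a :: b :: l) = a :: pvMerge (b :: l) := by
            simp [pvMerge, ha']
          rw [List.cons_append, hwt, this, ← hwt, ih (fun c hc => h c (by simp [hc]))]
          simp

-- per-word contribution of every word after the first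
def pvCharSep (w : List Char) : List Char := if w.length = 1 then w else ' ' :: w

-- the tail " w1 w2 …" of the normalized text, as pvMerge rewrites it
lemma merge_tail (ws : List (List Char))
    (h : ∀ w ∈ ws, w ≠ [] ∧ ∀ c ∈ w, c ≠ ' ') :
    pvMerge ((ws.map (fun v => ' ' :: v)).flatten) = (ws.map pvCharSep).flatten := by
  induction ws with
  | nil => simp [pvMerge]
  | cons v vs ih =>
      obtain ⟨hv, hvs⟩ := h v (by simp)
      have ih' := ih (fun w hw => h w (by simp [hw]))
      cases v with
      | nil => exact absurd rfl hv
      | cons d v' =>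
          cases v' with
          | nil =>
              have hT : (vs.map (fun v => ' ' :: v)).flatten = [] ∨
                  ((vs.map (fun v => ' ' :: v)).flatten).head? = some ' ' := by
                cases vs with
                | nil => left; simp
                | cons u us => right; simp
              have hcond : (((vs.map (fun v => ' ' :: v)).flatten).isEmpty ||
                  ((vs.map (fun v => ' ' :: v)).flatten).head? == some ' ') = true := by
                rcases hT with hT | hT <;> simp [hT]
              simp only [List.map_cons, List.flatten_cons, List.cons_append, List.nil_append]
              rw [show pvMerge (' ' :: d :: (vs.map (fun v => ' ' :: v)).flatten)
                    = d :: pvMerge ((vs.map (fun v => ' ' :: v)).flatten) from by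
                simp [pvMerge, hcond]]
              rw [ih']
              simp [pvCharSep]
          | cons e v'' =>
              have he : e ≠ ' ' := hvs e (by simp)
              have he' : (e == ' ') = false := by simpa using he
              simp only [List.map_cons, List.flatten_cons, List.cons_append]
              rw [show pvMerge (' ' :: d :: e :: (v'' ++ (vs.map (fun v => ' ' :: v)).flatten))
                    = ' ' :: pvMerge (d :: e :: (v'' ++ (vs.map (fun v => ' ' :: v)).flatten)) from by
                simp [pvMerge, he']]
              rw [show (d :: e :: (v'' ++ (vs.map (fun v => ' ' :: v)).flatten))
                    = (d :: e :: v'') ++ (vs.map (fun v => ' ' :: v)).flatten from by simp]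
              rw [merge_skip_word (d :: e :: v'') _ hvs, ih']
              simp [pvCharSep]

-- A's loop (from the previous analysis): join " " of the processed list
def pvL (xs : List String) : List Char := (PySem.Str.join " " xs).toList

def pvSep (w : String) : String :=
  if PySem.Str.len w == 1 then w else " " ++ w

def pvStep (acc : List String) (w : String) : List String :=
  if PySem.Str.len w == 1 && !acc.isEmpty then pvAddToLast acc w else acc ++ [w]

def pvC (xs : List String) : List Char := (PySem.Str.join "" xs).toList

lemma pvC_cons (x : String) (xs : List String) : pvC (x :: xs) = x.toList ++ pvC xs := by
  cases xs with
  | nil => simp [pvC, PySem.Str.toList_join, PySem.Chars.join_singleton, PySem.Chars.join_nil]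
  | cons y r => simp [pvC, PySem.Str.toList_join, PySem.Chars.join_cons_cons]

lemma pvL_addToLast (acc : List String) (h : acc ≠ []) (w : String) :
    pvL (pvAddToLast acc w) = pvL acc ++ w.toList := by
  induction acc with
  | nil => exact absurd rfl h
  | cons x xs ih =>
      cases xs with
      | nil => simp [pvAddToLast, pvL, PySem.Str.toList_join, PySem.Chars.join_singleton]
      | cons y r =>
          have hy : (y :: r : List String) ≠ [] := by simp
          simp only [pvAddToLast]
          have h1 : pvL (x :: pvAddToLast (y :: r) w)
              = x.toList ++ " ".toList ++ pvL (pvAddToLast (y :: r) w) := by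
            cases hz : pvAddToLast (y :: r) w with
            | nil => cases r <;> simp [pvAddToLast] at hz
            | cons z zs => simp [pvL, PySem.Str.toList_join, PySem.Chars.join_cons_cons]
          rw [h1, ih hy]
          simp [pvL, PySem.Str.toList_join, PySem.Chars.join_cons_cons]

lemma pvL_append_one (acc : List String) (h : acc ≠ []) (w : String) :
    pvL (acc ++ [w]) = pvL acc ++ ' ' :: w.toList := by
  induction acc with
  | nil => exact absurd rfl h
  | cons x xs ih =>
      cases xs with
      | nil =>
          simp [pvL, PySem.Str.toList_join, PySem.Chars.join_singleton, PySem.Chars.join_cons_cons]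
      | cons y r =>
          have hy : (y :: r : List String) ≠ [] := by simp
          have : pvL ((x :: y :: r) ++ [w]) = x.toList ++ " ".toList ++ pvL ((y :: r) ++ [w]) := by
            simp [pvL, PySem.Str.toList_join, PySem.Chars.join_cons_cons]
          rw [this, ih hy]
          simp [pvL, PySem.Str.toList_join, PySem.Chars.join_cons_cons]

lemma pvStep_ne_nil (acc : List String) (h : acc ≠ []) (w : String) : pvStep acc w ≠ [] := by
  unfold pvStep
  split
  · cases acc with
    | nil => exact absurd rfl h
    | cons x xs => cases xs <;> simp [pvAddToLast]
  · simp

lemma pv_invariant (ws : List String) (acc : List String) (h : acc ≠ []) :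
    pvL (ws.foldl pvStep acc) = pvL acc ++ pvC (ws.map pvSep) := by
  induction ws generalizing acc with
  | nil => simp [pvC, PySem.Str.toList_join, PySem.Chars.join_nil]
  | cons w ws ih =>
      rw [List.foldl_cons, ih (pvStep acc w) (pvStep_ne_nil acc h w), List.map_cons, pvC_cons]
      unfold pvStep pvSep
      have hne : (!acc.isEmpty) = true := by
        cases acc
        · exact absurd rfl h
        · simp
      cases hl : (PySem.Str.len w == 1) with
      | true =>
          simp only [hne, Bool.and_self, reduceIte]
          rw [pvL_addToLast acc h w]
          simp [List.append_assoc]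
      | false =>
          simp only [Bool.false_and, Bool.false_eq_true, reduceIte]
          rw [pvL_append_one acc h w]
          simp [List.append_assoc]

-- ' '.join (w :: ws) = w followed by " v" blocks
lemma pvJ_cons_tail (ws : List (List Char)) :
    ∀ w, pvJ (w :: ws) = w ++ (ws.map (fun v => ' ' :: v)).flatten := by
  induction ws with
  | nil => intro w; simp [pvJ, PySem.Chars.join_singleton]
  | cons v vs ih =>
      intro w
      rw [show pvJ (w :: v :: vs) = w ++ [' '] ++ pvJ (v :: vs) from
        PySem.Chars.join_cons_cons [' '] w v vs, ih v]
      simp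

-- B's result, in terms of the split words
lemma alt_eq_formula (text : String) :
    (process_extracted_text_alt text).toList =
      match PySem.Chars.split₀ text.toList with
      | [] => []
      | w :: ws => w ++ (ws.map pvCharSep).flatten := by
  have hout : (text.toList.foldl pvNormStep ([], false)).1 = pvJ (PySem.Chars.split₀ text.toList) := by
    have h0 : pvOut [] [] = ([] : List Char) := by simp [pvOut, pvJ, PySem.Chars.join_nil]
    have := norm_sim text.toList [] [] false (fun h => absurd rfl h) (fun _ h => absurd rfl h) (by simp)
    rw [h0] at this
    exact this
  have hwords := split₀_go_words text.toList [] [] (by simp) (by simp)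
  unfold process_extracted_text_alt
  rw [String.toList_ofList, hout]
  cases hws : PySem.Chars.split₀ text.toList with
  | nil => simp [pvJ, PySem.Chars.join_nil, pvMerge]
  | cons w ws =>
      have hwords' : ∀ v ∈ w :: ws, v ≠ [] ∧ ∀ c ∈ v, c ≠ ' ' := by
        intro v hv
        have := hwords v (by rw [show PySem.Chars.split₀.go text.toList [] [] = w :: ws from hws]; exact hv)
        refine ⟨this.1, fun c hc hceq => ?_⟩
        have h1 := this.2 c hc
        rw [hceq] at h1
        exact absurd h1 (by decide)
      rw [pvJ_cons_tail ws w,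
          merge_skip_word w _ (fun c hc => (hwords' w (by simp)).2 c hc),
          merge_tail ws (fun v hv => hwords' v (by simp [hv]))]

-- (pvSep w).toList is pvCharSep of w.toList
lemma pvSep_toList (w : String) : (pvSep w).toList = pvCharSep w.toList := by
  unfold pvSep pvCharSep
  cases h : (PySem.Str.len w == 1) with
  | true =>
      have h1 : w.toList.length = 1 := by simpa using h
      simp [h1, -String.length_toList]
  | false =>
      have h1 : ¬ w.toList.length = 1 := by simpa using h
      simp [h1, -String.length_toList]

lemma pvC_sep (ws : List String) :
    pvC (ws.map pvSep) = ((ws.map String.toList).map pvCharSep).flatten := by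
  induction ws with
  | nil => simp [pvC, PySem.Str.toList_join, PySem.Chars.join_nil]
  | cons x xs ih => rw [List.map_cons, pvC_cons, ih, pvSep_toList]; simp

-- ===== VERDICT (by name: the statement is the Claim_ definition above) =====
theorem process_extracted_text_spec : Claim_equal_process_extracted_text := by
  intro text _
  unfold Spec_process_extracted_text process_extracted_text
  apply String.toList_inj.mp
  rw [alt_eq_formula]
  have hbridge := PySem.Str.split₀_map_toList text
  cases hws : PySem.Str.split₀ text with
  | nil =>
      rw [hws] at hbridge
      rw [← hbridge]
      simp [PySem.Str.toList_join, PySem.Chars.join_nil]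
  | cons w ws =>
      rw [hws] at hbridge
      rw [← hbridge]
      simp only [List.foldl_cons]
      have h0 : (fun acc w =>
          if PySem.Str.len w == 1 && !List.isEmpty acc then pvAddToLast acc w
          else acc ++ [w]) = pvStep := by
        funext acc w; rfl
      rw [h0]
      have h1 : (if (PySem.Str.len w == 1 && ! ([] : List String).isEmpty) = true
          then pvAddToLast [] w else [] ++ [w]) = [w] := by simp
      rw [h1]
      have h2 := pv_invariant ws [w] (by simp)
      show pvL (ws.foldl pvStep [w]) = _
      rw [h2, pvC_sep]
      simp [pvL, PySem.Str.toList_join, PySem.Chars.join_singleton]
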